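-- pv_equiv track=rewrite | github.com/learningcoder00/CenterPoint | tools/generate_clip_preview.py | refine_clips
-- ===== SOURCE A (Python) =====
-- import math
--
-- def choose_split_index(clips, preferred_min_frames):
--     preferred = [
--         (idx, len(clip)) for idx, clip in enumerate(clips) if len(clip) >= preferred_min_frames
--     ]
--     if preferred:
--         return max(preferred, key=lambda x: x[1])[0]
--
--     fallback = [(idx, len(clip)) for idx, clip in enumerate(clips) if len(clip) >= 2]
--     if not fallback:
--         return None
--     return max(fallback, key=lambda x: x[1])[0]
--
-- def refine_clips(clips, target_clips, preferred_min_frames):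
--     clips = [clip for clip in clips if clip]
--
--     while len(clips) < target_clips:
--         split_idx = choose_split_index(clips, preferred_min_frames)
--         if split_idx is None:
--             break
--
--         clip = clips.pop(split_idx)
--         mid = int(math.ceil(len(clip) / 2.0))
--         left = clip[:mid]
--         right = clip[mid:]
--
--         if not left or not right:
--             clips.insert(split_idx, clip)
--             break
--
--         clips.insert(split_idx, right)
--         clips.insert(split_idx, left)
--
--     return clips[:target_clips]
-- ===== SOURCE B (Python) =====
-- import heapq
--
-- def refine_clips(clips, target_clips, preferred_min_frames):
--     # Max-heap (via negated lengths) keyed by (-len, position-path); splitting the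
--     # current longest clip provably never depends on preferred_min_frames.
--     heap = [(-len(clip), (idx,), clip) for idx, clip in enumerate(clips) if clip]
--     heapq.heapify(heap)
--     count = len(heap)
--     while count < target_clips and heap and heap[0][0] <= -2:
--         neg, pos, clip = heapq.heappop(heap)
--         mid = (len(clip) + 1) // 2
--         heapq.heappush(heap, (-mid, pos + (0,), clip[:mid]))
--         heapq.heappush(heap, (mid - len(clip), pos + (1,), clip[mid:]))
--         count += 1
--     orderd = sorted(heap, key=lambda entry: entry[1])
--     return [clip for _, _, clip in orderd][:target_clips]
-- ===== Notes on version B (the rewrite author's own statement) =====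
-- stated objective: faster
-- what changed: Replaces A's quadratic loop (rebuild preferred/fallback index lists, max-scan, pop and double insert into the clip list each iteration) by a heapq max-heap keyed by (-length, position-path): pop the longest clip, push its two halves, emit survivors sorted by position at the end; A's preferred_min_frames selection provably reduces to 'split the leftmost longest clip'.
import Mathlib
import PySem

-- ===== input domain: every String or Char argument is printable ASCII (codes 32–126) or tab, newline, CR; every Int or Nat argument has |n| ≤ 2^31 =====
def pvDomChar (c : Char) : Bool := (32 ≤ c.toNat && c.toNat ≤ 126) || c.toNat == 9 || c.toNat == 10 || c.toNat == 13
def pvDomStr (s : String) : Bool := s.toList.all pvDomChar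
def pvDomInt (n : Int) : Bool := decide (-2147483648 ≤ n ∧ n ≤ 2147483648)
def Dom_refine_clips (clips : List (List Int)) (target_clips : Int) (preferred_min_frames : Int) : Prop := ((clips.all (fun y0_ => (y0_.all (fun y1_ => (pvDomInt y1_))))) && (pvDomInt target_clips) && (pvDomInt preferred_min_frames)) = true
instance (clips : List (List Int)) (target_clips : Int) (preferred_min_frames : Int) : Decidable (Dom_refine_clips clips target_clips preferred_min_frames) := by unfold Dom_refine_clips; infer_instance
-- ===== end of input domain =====

-- B replaces A's per-iteration list rescans (preferred/fallback index hunt + pop/insert)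
-- by a heap of (-length, position-path) keys popped/pushed, emitting by position at the end.

-- ===== PORT A =====

def choose_split_index (clips : List (List Int)) (preferred_min_frames : Int) : Option Int :=
  let preferred : List (Int × Int) :=
    ((PySem.List.enumerate clips).filter
      (fun p => preferred_min_frames ≤ (p.2.length : Int))).map (fun p => (p.1, (p.2.length : Int)))
  if preferred ≠ [] then
    (PySem.List.max? preferred (fun x => x.2)).map (fun m => m.1)
  else
    let fallback : List (Int × Int) :=
      ((PySem.List.enumerate clips).filter
        (fun p => (2 : Int) ≤ (p.2.length : Int))).map (fun p => (p.1, (p.2.length : Int)))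
    if fallback = [] then none
    else (PySem.List.max? fallback (fun x => x.2)).map (fun m => m.1)

-- the while-loop of A, as structural recursion on the remaining number of splits
-- (each iteration grows the list by one, so target - len(clips) bounds the loop);
-- `int(math.ceil(len/2.0))` is ported as (len+1)/2, exact for every list length
-- (float ceil of n/2.0 is exact for n < 2^53)
def refineLoopA : Nat → Int → Int → List (List Int) → List (List Int)
  | 0, _, _, clips => clips
  | fuel + 1, target_clips, preferred_min_frames, clips =>
    if (clips.length : Int) < target_clips then
      match choose_split_index clips preferred_min_frames with
      | none => clips
      | some split_idx =>
        match PySem.List.pop? clips split_idx with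
        | none => clips   -- unreachable: choose_split_index always returns an in-range index
        | some (clip, rest) =>
          let mid : Int := ((clip.length : Int) + 1) / 2
          let left := PySem.List.slice clip none (some mid)
          let right := PySem.List.slice clip (some mid) none
          if left = [] ∨ right = [] then
            PySem.List.insert rest split_idx clip
          else
            refineLoopA fuel target_clips preferred_min_frames
              (PySem.List.insert (PySem.List.insert rest split_idx right) split_idx left)
    else clips

def refine_clips (clips : List (List Int)) (target_clips : Int) (preferred_min_frames : Int) :
    List (List Int) :=
  let start := clips.filter (fun c => !c.isEmpty)
  PySem.List.slice
    (refineLoopA (target_clips - start.length).toNat target_clips preferred_min_frames start)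
    none (some target_clips)

-- ===== PORT B =====

-- Python's lexicographic `<` on int tuples (the position paths are int tuples)
def posLt : List Int → List Int → Bool
  | [], [] => false
  | [], _ :: _ => true
  | _ :: _, [] => false
  | a :: as, b :: bs => a < b || (a == b && posLt as bs)

-- heap-entry order: key (-length, position); positions are pairwise distinct, so the
-- third tuple component is never compared in Python either
def entLt (x y : Int × List Int × List Int) : Bool :=
  x.1 < y.1 || (x.1 == y.1 && posLt x.2.1 y.2.1)

-- contract of heapq.heappop on a heap list: extract the minimal entry, keep the others
def popMin (e : Int × List Int × List Int) :
    List (Int × List Int × List Int) →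
      (Int × List Int × List Int) × List (Int × List Int × List Int)
  | [] => (e, [])
  | x :: xs =>
    if entLt x e then ((popMin x xs).1, e :: (popMin x xs).2)
    else ((popMin e xs).1, x :: (popMin e xs).2)

-- `sorted(heap, key=lambda entry: entry[1])`: insertion sort by position
def insertPos (e : Int × List Int × List Int) :
    List (Int × List Int × List Int) → List (Int × List Int × List Int)
  | [] => [e]
  | x :: xs => if posLt x.2.1 e.2.1 then x :: insertPos e xs else e :: x :: xs

def sortByPos : List (Int × List Int × List Int) → List (Int × List Int × List Int)
  | [] => []
  | x :: xs => insertPos x (sortByPos xs)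

def refineLoopB : Nat → Int → Int → List (Int × List Int × List Int) →
    List (Int × List Int × List Int)
  | 0, _, _, heap => heap
  | fuel + 1, target_clips, count, heap =>
    if count < target_clips then
      match heap with
      | [] => heap
      | e :: rest =>
        let pr := popMin e rest
        if pr.1.1 ≤ -2 then
          let clip := pr.1.2.2
          let mid : Int := ((clip.length : Int) + 1) / 2
          refineLoopB fuel target_clips (count + 1)
            (pr.2 ++ [(-mid, pr.1.2.1 ++ [0], PySem.List.slice clip none (some mid)),
                      (mid - (clip.length : Int), pr.1.2.1 ++ [1],
                       PySem.List.slice clip (some mid) none)])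
        else heap
    else heap

def refine_clips_alt (clips : List (List Int)) (target_clips : Int)
    (preferred_min_frames : Int) : List (List Int) :=
  let heap := ((PySem.List.enumerate clips).filter (fun p => !p.2.isEmpty)).map
    (fun p => (-(p.2.length : Int), [p.1], p.2))
  let fin := refineLoopB (target_clips - heap.length).toNat target_clips
    (heap.length : Int) heap
  PySem.List.slice ((sortByPos fin).map (fun e => e.2.2)) none (some target_clips)

-- ===== PRECONDITION & SPEC =====
def Spec_refine_clips (clips : List (List Int)) (target_clips : Int) (preferred_min_frames : Int) (out : List (List Int)) : Prop := out = refine_clips_alt clips target_clips preferred_min_frames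
instance (clips : List (List Int)) (target_clips : Int) (preferred_min_frames : Int) (out : List (List Int)) : Decidable (Spec_refine_clips clips target_clips preferred_min_frames out) := by unfold Spec_refine_clips; infer_instance

-- ===== CLAIM (what is proved, stated in full; the proofs are below) =====
def Claim_equal_refine_clips : Prop := ∀ (clips : List (List Int)) (target_clips : Int) (preferred_min_frames : Int), Dom_refine_clips clips target_clips preferred_min_frames → Spec_refine_clips clips target_clips preferred_min_frames (refine_clips clips target_clips preferred_min_frames)

-- ===== LEMMAS AND PROOFS =====

-- ---- order lemmas on position paths ----

theorem posLt_irrefl (p : List Int) : posLt p p = false := by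
  induction p with
  | nil => rfl
  | cons a as ih => simp [posLt, ih]

theorem posLt_trans {p q r : List Int} (h1 : posLt p q = true) (h2 : posLt q r = true) :
    posLt p r = true := by
  induction p generalizing q r with
  | nil =>
    cases q with
    | nil => simp [posLt] at h1
    | cons b bs =>
      cases r with
      | nil => simp [posLt] at h2
      | cons c cs => simp [posLt]
  | cons a as ih =>
    cases q with
    | nil => simp [posLt] at h1
    | cons b bs =>
      cases r with
      | nil => simp [posLt] at h2
      | cons c cs =>
        simp only [posLt, Bool.or_eq_true, Bool.and_eq_true, beq_iff_eq,
          decide_eq_true_eq] at h1 h2 ⊢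
        rcases h1 with h1 | ⟨rfl, h1⟩ <;> rcases h2 with h2 | ⟨rfl, h2⟩
        · exact Or.inl (h1.trans h2)
        · exact Or.inl h1
        · exact Or.inl h2
        · exact Or.inr ⟨rfl, ih h1 h2⟩

theorem posLt_asymm {p q : List Int} (h1 : posLt p q = true) (h2 : posLt q p = true) : False := by
  have h := posLt_trans h1 h2
  rw [posLt_irrefl] at h
  exact Bool.noConfusion h

theorem posLt_conn {p q : List Int} (h1 : posLt p q = false) (h2 : posLt q p = false) :
    p = q := by
  induction p generalizing q with
  | nil =>
    cases q with
    | nil => rfl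
    | cons b bs => simp [posLt] at h1
  | cons a as ih =>
    cases q with
    | nil => simp [posLt] at h2
    | cons b bs =>
      simp only [posLt, Bool.or_eq_false_iff, Bool.and_eq_false_iff, beq_iff_eq,
        beq_eq_false_iff_ne, ne_eq, decide_eq_false_iff_not] at h1 h2
      have hab : a = b := by omega
      subst hab
      rcases h1.2 with h | h
      · simp at h
      · rcases h2.2 with h' | h'
        · simp at h'
        · rw [ih h h']

-- strict position order: the paths differ at an index present in both
def posLtS : List Int → List Int → Bool
  | [], _ => false
  | _, [] => false
  | a :: as, b :: bs => a < b || (a == b && posLtS as bs)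

theorem posLtS_posLt {p q : List Int} (h : posLtS p q = true) : posLt p q = true := by
  induction p generalizing q with
  | nil => simp [posLtS] at h
  | cons a as ih =>
    cases q with
    | nil => simp [posLtS] at h
    | cons b bs =>
      simp only [posLtS, Bool.or_eq_true, Bool.and_eq_true, beq_iff_eq, decide_eq_true_eq] at h
      simp only [posLt, Bool.or_eq_true, Bool.and_eq_true, beq_iff_eq, decide_eq_true_eq]
      rcases h with h | ⟨rfl, h⟩
      · exact Or.inl h
      · exact Or.inr ⟨rfl, ih h⟩

theorem posLtS_append {p q : List Int} (u v : List Int) (h : posLtS p q = true) :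
    posLtS (p ++ u) (q ++ v) = true := by
  induction p generalizing q with
  | nil => simp [posLtS] at h
  | cons a as ih =>
    cases q with
    | nil => simp [posLtS] at h
    | cons b bs =>
      simp only [List.cons_append, posLtS, Bool.or_eq_true, Bool.and_eq_true, beq_iff_eq,
        decide_eq_true_eq] at h ⊢
      rcases h with h | ⟨rfl, h⟩
      · exact Or.inl h
      · exact Or.inr ⟨rfl, ih h⟩

theorem posLtS_snoc {a b : Int} (p : List Int) (h : a < b) :
    posLtS (p ++ [a]) (p ++ [b]) = true := by
  induction p with
  | nil => simp [posLtS, h]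
  | cons c cs ih => simp [posLtS, ih]

-- ---- entry order ----

theorem entLt_irrefl (x : Int × List Int × List Int) : entLt x x = false := by
  simp [entLt, posLt_irrefl]

theorem entLt_of_parts {x y : Int × List Int × List Int} (h1 : x.1 = y.1) (h2 : x.2.1 = y.2.1)
    (z : Int × List Int × List Int) : entLt x z = entLt y z := by
  simp [entLt, h1, h2]

theorem entLt_trans {x y z : Int × List Int × List Int} (h1 : entLt x y = true)
    (h2 : entLt y z = true) : entLt x z = true := by
  simp only [entLt, Bool.or_eq_true, Bool.and_eq_true, beq_iff_eq, decide_eq_true_eq] at h1 h2 ⊢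
  rcases h1 with h1 | ⟨e1, p1⟩ <;> rcases h2 with h2 | ⟨e2, p2⟩
  · exact Or.inl (h1.trans h2)
  · exact Or.inl (e2 ▸ h1)
  · exact Or.inl (e1 ▸ h2)
  · exact Or.inr ⟨e1.trans e2, posLt_trans p1 p2⟩

theorem entLt_conn {x y : Int × List Int × List Int} (h1 : entLt x y = false)
    (h2 : entLt y x = false) : x.1 = y.1 ∧ x.2.1 = y.2.1 := by
  simp only [entLt, Bool.or_eq_false_iff, Bool.and_eq_false_iff, beq_iff_eq,
    beq_eq_false_iff_ne, ne_eq, decide_eq_false_iff_not] at h1 h2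
  have he : x.1 = y.1 := by omega
  refine ⟨he, ?_⟩
  rcases h1.2 with h | h
  · exact absurd he h
  · rcases h2.2 with h' | h'
    · exact absurd he.symm h'
    · exact posLt_conn h h'

-- ---- popMin: permutation and minimality ----

theorem popMin_perm (xs : List (Int × List Int × List Int)) (e : Int × List Int × List Int) :
    (e :: xs).Perm ((popMin e xs).1 :: (popMin e xs).2) := by
  induction xs generalizing e with
  | nil => simp [popMin]
  | cons x xs ih =>
    by_cases h : entLt x e = true
    · simp only [popMin, h, if_true]
      exact (List.Perm.cons e (ih x)).trans (List.Perm.swap (popMin x xs).1 e (popMin x xs).2)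
    · have h' : entLt x e = false := by simpa using h
      simp only [popMin, h', Bool.false_eq_true, if_false]
      exact (List.Perm.swap x e xs).trans
        ((List.Perm.cons x (ih e)).trans (List.Perm.swap (popMin e xs).1 x (popMin e xs).2))

theorem popMin_min (xs : List (Int × List Int × List Int)) (e : Int × List Int × List Int) :
    ∀ y ∈ e :: xs, entLt y (popMin e xs).1 = false := by
  induction xs generalizing e with
  | nil =>
    intro y hy
    rw [List.mem_singleton] at hy
    rw [hy]
    simp [popMin, entLt_irrefl]
  | cons x xs ih =>
    intro y hy
    by_cases h : entLt x e = true
    · simp only [popMin, h, if_true]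
      rcases List.mem_cons.mp hy with h1 | h1
      · rw [h1]
        by_contra hc
        have hc' : entLt e (popMin x xs).1 = true := by simpa using hc
        have hx : entLt x (popMin x xs).1 = false := ih x x (by simp)
        have hcontra : entLt x (popMin x xs).1 = true := entLt_trans h hc'
        rw [hx] at hcontra; exact Bool.noConfusion hcontra
      · exact ih x y h1
    · have h' : entLt x e = false := by simpa using h
      simp only [popMin, h', Bool.false_eq_true, if_false]
      rcases List.mem_cons.mp hy with h1 | h1
      · rw [h1]; exact ih e e (by simp)
      · rcases List.mem_cons.mp h1 with h2 | h2
        · rw [h2]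
          by_contra hc
          have hc' : entLt x (popMin e xs).1 = true := by simpa using hc
          have he : entLt e (popMin e xs).1 = false := ih e e (by simp)
          by_cases hex : entLt e x = true
          · have hcontra : entLt e (popMin e xs).1 = true := entLt_trans hex hc'
            rw [he] at hcontra; exact Bool.noConfusion hcontra
          · have hex' : entLt e x = false := by simpa using hex
            obtain ⟨hk, hpp⟩ := entLt_conn h' hex'
            have heq : entLt x (popMin e xs).1 = entLt e (popMin e xs).1 :=
              entLt_of_parts hk hpp _
            rw [heq, he] at hc'; exact Bool.noConfusion hc'
        · exact ih e y (by simp [h2])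

-- ---- sortByPos: permutation, sortedness, uniqueness ----

theorem mem_insertPos {y e : Int × List Int × List Int}
    {l : List (Int × List Int × List Int)} :
    y ∈ insertPos e l ↔ y = e ∨ y ∈ l := by
  induction l with
  | nil => simp [insertPos]
  | cons x xs ih =>
    by_cases h : posLt x.2.1 e.2.1 = true
    · simp only [insertPos, h, if_true, List.mem_cons, ih]
      tauto
    · have h' : posLt x.2.1 e.2.1 = false := by simpa using h
      simp only [insertPos, h', Bool.false_eq_true, if_false, List.mem_cons]
      try tauto

theorem insertPos_perm (e : Int × List Int × List Int)
    (l : List (Int × List Int × List Int)) : (insertPos e l).Perm (e :: l) := by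
  induction l with
  | nil => simp [insertPos]
  | cons x xs ih =>
    by_cases h : posLt x.2.1 e.2.1 = true
    · simp only [insertPos, h, if_true]
      exact (List.Perm.cons x ih).trans (List.Perm.swap e x xs)
    · have h' : posLt x.2.1 e.2.1 = false := by simpa using h
      simp only [insertPos, h', Bool.false_eq_true, if_false]
      exact List.Perm.refl _

theorem sortByPos_perm (l : List (Int × List Int × List Int)) : (sortByPos l).Perm l := by
  induction l with
  | nil => simp [sortByPos]
  | cons x xs ih =>
    exact (insertPos_perm x (sortByPos xs)).trans (List.Perm.cons x ih)

theorem insertPos_pairwise {e : Int × List Int × List Int}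
    {l : List (Int × List Int × List Int)}
    (hl : l.Pairwise (fun x y => posLt y.2.1 x.2.1 = false)) :
    (insertPos e l).Pairwise (fun x y => posLt y.2.1 x.2.1 = false) := by
  induction l with
  | nil => simp [insertPos]
  | cons x xs ih =>
    rcases List.pairwise_cons.mp hl with ⟨hx, hxs⟩
    by_cases h : posLt x.2.1 e.2.1 = true
    · simp only [insertPos, h, if_true]
      refine List.pairwise_cons.mpr ⟨?_, ih hxs⟩
      intro y hy
      rcases mem_insertPos.mp hy with rfl | hy'
      · by_contra hc
        exact posLt_asymm h (by simpa using hc)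
      · exact hx y hy'
    · have h' : posLt x.2.1 e.2.1 = false := by simpa using h
      simp only [insertPos, h', Bool.false_eq_true, if_false]
      refine List.pairwise_cons.mpr ⟨?_, hl⟩
      intro y hy
      rcases List.mem_cons.mp hy with rfl | hy'
      · exact h'
      · -- posLt y e = false: from ¬ (y < x) and ¬ (x < e)
        by_contra hc
        have hye : posLt y.2.1 e.2.1 = true := by simpa using hc
        have hyx : posLt y.2.1 x.2.1 = false := hx y hy'
        by_cases hxy : posLt x.2.1 y.2.1 = true
        · have hcontra : posLt x.2.1 e.2.1 = true := posLt_trans hxy hye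
          rw [h'] at hcontra; exact Bool.noConfusion hcontra
        · have hxy' : posLt x.2.1 y.2.1 = false := by simpa using hxy
          have hpe : x.2.1 = y.2.1 := posLt_conn hxy' hyx
          rw [← hpe] at hye
          rw [h'] at hye; exact Bool.noConfusion hye

theorem sortByPos_pairwise (l : List (Int × List Int × List Int)) :
    (sortByPos l).Pairwise (fun x y => posLt y.2.1 x.2.1 = false) := by
  induction l with
  | nil => simp [sortByPos]
  | cons x xs ih => exact insertPos_pairwise ih

-- a weakly sorted permutation of a strictly sorted list is that list
theorem sorted_unique : ∀ (s l : List (Int × List Int × List Int)),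
    l.Perm s → l.Pairwise (fun x y => posLt y.2.1 x.2.1 = false) →
    s.Pairwise (fun x y => posLtS x.2.1 y.2.1 = true) → l = s := by
  intro s
  induction s with
  | nil =>
    intro l hp _ _
    exact List.Perm.eq_nil hp
  | cons y t ih =>
    intro l hp hw hs
    cases l with
    | nil =>
      exfalso
      have hlen := hp.length_eq
      simp at hlen
    | cons a l' =>
      rcases List.pairwise_cons.mp hs with ⟨hy, ht⟩
      rcases List.pairwise_cons.mp hw with ⟨ha, hl'⟩
      have hay : a = y := by
        have hmem : a ∈ y :: t := hp.mem_iff.mp (by simp)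
        rcases List.mem_cons.mp hmem with h | h
        · exact h
        · exfalso
          have h1 : posLt y.2.1 a.2.1 = true := posLtS_posLt (hy a h)
          have hymem : y ∈ a :: l' := hp.mem_iff.mpr (by simp)
          rcases List.mem_cons.mp hymem with h2 | h2
          · rw [h2] at h1; rw [posLt_irrefl] at h1; exact Bool.noConfusion h1
          · have := ha y h2
            rw [this] at h1; exact Bool.noConfusion h1
      subst hay
      have hp' : l'.Perm t := hp.cons_inv
      rw [ih l' hp' hl' ht]

theorem sortByPos_eq_of_perm {heap s : List (Int × List Int × List Int)}
    (hperm : heap.Perm s) (hs : s.Pairwise (fun x y => posLtS x.2.1 y.2.1 = true)) :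
    sortByPos heap = s :=
  sorted_unique s (sortByPos heap) ((sortByPos_perm heap).trans hperm)
    (sortByPos_pairwise heap) hs

-- ---- Python max(lst, key=...) returns the first maximum ----

def pymaxStep {α : Type} (key : α → Int) : Option α → α → Option α := fun acc x =>
  match acc with
  | none => some x
  | some m => if key m < key x then some x else some m

theorem max?_eq_foldl_pymaxStep {α : Type} (xs : List α) (key : α → Int) :
    PySem.List.max? xs key = xs.foldl (pymaxStep key) none := rfl

theorem pymax_keep {α : Type} (key : α → Int) (m : α) (bs : List α)
    (h : ∀ c ∈ bs, key c ≤ key m) :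
    bs.foldl (pymaxStep key) (some m) = some m := by
  induction bs with
  | nil => rfl
  | cons b bs ih =>
    have hb : ¬ key m < key b := not_lt.mpr (h b (by simp))
    rw [List.foldl_cons]
    show List.foldl (pymaxStep key) (if key m < key b then some b else some m) bs = some m
    rw [if_neg hb]
    exact ih (fun c hc => h c (by simp [hc]))

theorem pymax_go {α : Type} (key : α → Int) (as : List α) (b : α) (bs : List α)
    (acc : Option α)
    (hacc : acc = none ∨ ∃ a, acc = some a ∧ key a < key b)
    (ha : ∀ a ∈ as, key a < key b) (hb : ∀ c ∈ bs, key c ≤ key b) :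
    (as ++ b :: bs).foldl (pymaxStep key) acc = some b := by
  induction as generalizing acc with
  | nil =>
    rcases hacc with rfl | ⟨a, rfl, hab⟩
    · simp only [List.nil_append, List.foldl_cons]
      exact pymax_keep key b bs hb
    · simp only [List.nil_append, List.foldl_cons]
      show List.foldl (pymaxStep key) (if key a < key b then some b else some a) bs = some b
      rw [if_pos hab]
      exact pymax_keep key b bs hb
  | cons a as ih =>
    simp only [List.cons_append, List.foldl_cons]
    have haa : key a < key b := ha a (by simp)
    have ha' : ∀ x ∈ as, key x < key b := fun x hx => ha x (by simp [hx])
    rcases hacc with rfl | ⟨a0, rfl, ha0⟩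
    · exact ih _ (Or.inr ⟨a, rfl, haa⟩) ha'
    · show (as ++ b :: bs).foldl (pymaxStep key)
          (if key a0 < key a then some a else some a0) = some b
      by_cases hc : key a0 < key a
      · rw [if_pos hc]
        exact ih _ (Or.inr ⟨a, rfl, haa⟩) ha'
      · rw [if_neg hc]
        exact ih _ (Or.inr ⟨a0, rfl, ha0⟩) ha'

theorem pymax_first {α : Type} (key : α → Int) (as : List α) (b : α) (bs : List α)
    (ha : ∀ a ∈ as, key a < key b) (hb : ∀ c ∈ bs, key c ≤ key b) :
    PySem.List.max? (as ++ b :: bs) key = some b := by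
  rw [max?_eq_foldl_pymaxStep]
  exact pymax_go key as b bs none (Or.inl rfl) ha hb

-- ---- characterisation of choose_split_index at a leftmost maximum ----

theorem enum_snd_mem {xs : List (List Int)} {s : Int} {p : Int × List Int}
    (h : p ∈ PySem.List.enumerate xs s) : p.2 ∈ xs := by
  rcases (PySem.List.mem_enumerate_iff xs s p).mp h with ⟨k, hk, hpk⟩
  rw [hpk]
  simp

theorem choose_char (u : List (List Int)) (c : List Int) (v : List (List Int)) (pmf : Int)
    (hu : ∀ x ∈ u, x.length < c.length) (hv : ∀ y ∈ v, y.length ≤ c.length) :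
    choose_split_index (u ++ c :: v) pmf =
      if pmf ≤ (c.length : Int) ∨ (2 : Int) ≤ (c.length : Int)
      then some (u.length : Int) else none := by
  have hpiv : PySem.List.enumerate (u ++ c :: v) 0 =
      PySem.List.enumerate u 0 ++ ((u.length : Int), c) ::
        PySem.List.enumerate v ((u.length : Int) + 1) := by
    rw [PySem.List.enumerate_append, PySem.List.enumerate_cons]
    norm_num
  -- the first maximal entry of either candidate list is the pivot (u.length, c)
  have hmax : ∀ (P : Int × List Int → Bool), P ((u.length : Int), c) = true →
      PySem.List.max? (((PySem.List.enumerate (u ++ c :: v) 0).filter P).map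
          (fun p => (p.1, (p.2.length : Int)))) (fun x => x.2) =
        some ((u.length : Int), (c.length : Int)) := by
    intro P hP
    rw [hpiv, List.filter_append, List.filter_cons, hP]
    simp only [if_true, List.map_append, List.map_cons]
    apply pymax_first
    · intro a hm
      rcases List.mem_map.mp hm with ⟨p, hpf, rfl⟩
      have hpm : p.2 ∈ u := enum_snd_mem (List.mem_of_mem_filter hpf)
      have := hu _ hpm
      dsimp only
      exact_mod_cast this
    · intro b hm
      rcases List.mem_map.mp hm with ⟨p, hpf, rfl⟩
      have hpm : p.2 ∈ v := enum_snd_mem (List.mem_of_mem_filter hpf)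
      have := hv _ hpm
      dsimp only
      exact_mod_cast this
  have hmemlen : ∀ p ∈ PySem.List.enumerate (u ++ c :: v) 0,
      (p.2.length : Int) ≤ (c.length : Int) := by
    intro p hp
    have h2 := enum_snd_mem hp
    rcases List.mem_append.mp h2 with h3 | h3
    · exact_mod_cast le_of_lt (hu _ h3)
    · rcases List.mem_cons.mp h3 with h4 | h4
      · rw [h4]
      · exact_mod_cast hv _ h4
  have hpivmem : ((u.length : Int), c) ∈ PySem.List.enumerate (u ++ c :: v) 0 := by
    rw [hpiv]
    exact List.mem_append.mpr (Or.inr List.mem_cons_self)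
  by_cases h1 : pmf ≤ (c.length : Int)
  · rw [if_pos (Or.inl h1)]
    have hne : ((PySem.List.enumerate (u ++ c :: v) 0).filter
        (fun p => decide (pmf ≤ (p.2.length : Int)))).map
        (fun p => (p.1, (p.2.length : Int))) ≠ [] :=
      List.ne_nil_of_mem (List.mem_map.mpr
        ⟨((u.length : Int), c), List.mem_filter.mpr ⟨hpivmem, by simpa using h1⟩, rfl⟩)
    have hm1 := hmax (fun p => decide (pmf ≤ (p.2.length : Int))) (by simpa using h1)
    simp only [choose_split_index]
    rw [if_pos hne, hm1]
    rfl
  · have hpe : (PySem.List.enumerate (u ++ c :: v) 0).filter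
        (fun p => decide (pmf ≤ (p.2.length : Int))) = [] := by
      apply List.filter_eq_nil_iff.mpr
      intro p hp
      have := hmemlen p hp
      simp only [decide_eq_true_eq]
      omega
    by_cases h2 : (2 : Int) ≤ (c.length : Int)
    · rw [if_pos (Or.inr h2)]
      have hne : ((PySem.List.enumerate (u ++ c :: v) 0).filter
          (fun p => decide ((2 : Int) ≤ (p.2.length : Int)))).map
          (fun p => (p.1, (p.2.length : Int))) ≠ [] :=
        List.ne_nil_of_mem (List.mem_map.mpr
          ⟨((u.length : Int), c), List.mem_filter.mpr ⟨hpivmem, by simpa using h2⟩, rfl⟩)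
      have hm2 := hmax (fun p => decide ((2 : Int) ≤ (p.2.length : Int))) (by simpa using h2)
      simp only [choose_split_index]
      rw [hpe]
      simp only [List.map_nil, ne_eq, not_true_eq_false, if_false]
      rw [if_neg hne, hm2]
      rfl
    · rw [if_neg (by tauto)]
      have hfe : (PySem.List.enumerate (u ++ c :: v) 0).filter
          (fun p => decide ((2 : Int) ≤ (p.2.length : Int))) = [] := by
        apply List.filter_eq_nil_iff.mpr
        intro p hp
        have := hmemlen p hp
        simp only [decide_eq_true_eq]
        omega
      simp only [choose_split_index]
      rw [hpe]
      simp only [List.map_nil, ne_eq, not_true_eq_false, if_false]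
      rw [hfe]
      simp

-- ---- helpers for indexing / splicing at the split position ----

theorem posLtS_extend_left {p q : List Int} (w : List Int) (h : posLtS p q = true) :
    posLtS (p ++ w) q = true := by
  have h2 := posLtS_append w [] h
  rwa [List.append_nil] at h2

theorem posLtS_extend_right {p q : List Int} (w : List Int) (h : posLtS p q = true) :
    posLtS p (q ++ w) = true := by
  have h2 := posLtS_append [] w h
  rwa [List.append_nil] at h2

theorem getElem_append_cons_self {α : Type} (l₁ : List α) (a : α) (l₂ : List α) :
    (l₁ ++ a :: l₂)[l₁.length]'(by simp only [List.length_append, List.length_cons]; omega) = a := by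
  induction l₁ with
  | nil => rfl
  | cons x xs ih => simpa using ih

theorem eraseIdx_append_cons_self {α : Type} (l₁ : List α) (a : α) (l₂ : List α) :
    (l₁ ++ a :: l₂).eraseIdx l₁.length = l₁ ++ l₂ := by
  induction l₁ with
  | nil => rfl
  | cons x xs ih =>
    simp only [List.cons_append, List.length_cons, List.eraseIdx_cons_succ, ih]

-- ---- main loop equivalence ----

theorem mainLoop : ∀ (fuel : Nat) (target pmf count : Int)
    (heap s : List (Int × List Int × List Int)),
    heap.Perm s →
    s.Pairwise (fun x y => posLtS x.2.1 y.2.1 = true) →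
    (∀ e ∈ s, e.1 = -(e.2.2.length : Int) ∧ e.2.2 ≠ []) →
    count = (heap.length : Int) →
    refineLoopA fuel target pmf (s.map (fun e => e.2.2)) =
      (sortByPos (refineLoopB fuel target count heap)).map (fun e => e.2.2) := by
  intro fuel
  induction fuel with
  | zero =>
    intro target pmf count heap s hperm hs hinv hcount
    simp only [refineLoopA, refineLoopB]
    rw [sortByPos_eq_of_perm hperm hs]
  | succ fuel ih =>
    intro target pmf count heap s hperm hs hinv hcount
    by_cases hlt : count < target
    · cases heap with
      | nil =>
        have hsnil : s = [] := List.Perm.eq_nil hperm.symm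
        subst hsnil
        have hch : choose_split_index [] pmf = none := by
          simp [choose_split_index, PySem.List.enumerate_nil]
        simp only [List.map_nil, refineLoopA, refineLoopB, hch]
        split_ifs <;> simp [sortByPos]
      | cons e rest =>
        have hpp := popMin_perm rest e
        have hmin := popMin_min rest e
        set m := (popMin e rest).1 with hm
        set r := (popMin e rest).2 with hr
        have hm_mem : m ∈ s := hperm.subset (hpp.symm.subset (by simp))
        obtain ⟨u, v, hsuv⟩ := List.append_of_mem hm_mem
        subst hsuv
        obtain ⟨hpw_u, hpw_mv, hcross⟩ := List.pairwise_append.mp hs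
        obtain ⟨hm_v, hpw_v⟩ := List.pairwise_cons.mp hpw_mv
        have hmins : ∀ y ∈ u ++ m :: v, entLt y m = false := by
          intro y hy
          exact hmin y (hperm.symm.subset hy)
        have hinvm := hinv m (by simp)
        have hu' : ∀ x ∈ List.map (fun e => e.2.2) u, x.length < m.2.2.length := by
          intro x hx
          rcases List.mem_map.mp hx with ⟨a, ha, rfl⟩
          have h1 : posLt a.2.1 m.2.1 = true := posLtS_posLt (hcross a ha m (by simp))
          have h2 : entLt a m = false := hmins a (List.mem_append_left _ ha)
          have hia := (hinv a (List.mem_append_left _ ha)).1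
          simp only [entLt, Bool.or_eq_false_iff, Bool.and_eq_false_iff,
            beq_eq_false_iff_ne, ne_eq, decide_eq_false_iff_not] at h2
          obtain ⟨h2a, h2b⟩ := h2
          rcases h2b with h3 | h3
          · have hltm : m.1 < a.1 := by omega
            rw [hia, hinvm.1] at hltm
            omega
          · rw [h1] at h3
            exact Bool.noConfusion h3
        have hv' : ∀ y ∈ List.map (fun e => e.2.2) v, y.length ≤ m.2.2.length := by
          intro y hy
          rcases List.mem_map.mp hy with ⟨b, hb, rfl⟩
          have h2 : entLt b m = false :=
            hmins b (List.mem_append_right _ (List.mem_cons_of_mem _ hb))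
          have hib := (hinv b (List.mem_append_right _ (List.mem_cons_of_mem _ hb))).1
          simp only [entLt, Bool.or_eq_false_iff, Bool.and_eq_false_iff,
            beq_eq_false_iff_ne, ne_eq, decide_eq_false_iff_not] at h2
          have h2a := h2.1
          rw [hib, hinvm.1] at h2a
          omega
        have h6 := hperm.length_eq
        simp only [List.length_append, List.length_cons] at h6
        simp only [List.length_cons] at hcount
        have hA : ((List.map (fun e => e.2.2) u ++ m.2.2 ::
            List.map (fun e => e.2.2) v).length : Int) < target := by
          simp only [List.length_append, List.length_map, List.length_cons]
          omega
        simp only [List.map_append, List.map_cons]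
        rw [refineLoopA, if_pos hA, choose_char _ _ _ pmf hu' hv']
        rw [refineLoopB, if_pos hlt]
        dsimp only
        rw [← hm, ← hr]
        by_cases hL2 : (2 : Int) ≤ (m.2.2.length : Int)
        · -- split step on both sides
          rw [if_pos (Or.inr hL2)]
          set midN : Nat := (m.2.2.length + 1) / 2 with hmidN
          have hmid : ((m.2.2.length : Int) + 1) / 2 = (midN : Int) := by omega
          have hpop : PySem.List.pop? (List.map (fun e => e.2.2) u ++ m.2.2 ::
              List.map (fun e => e.2.2) v)
              ((List.map (fun e : Int × List Int × List Int => e.2.2) u).length : Int) =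
              some (m.2.2, List.map (fun e => e.2.2) u ++ List.map (fun e => e.2.2) v) := by
            have h := PySem.List.pop?_natCast (List.map (fun e => e.2.2) u ++ m.2.2 ::
              List.map (fun e => e.2.2) v)
              (List.map (fun e : Int × List Int × List Int => e.2.2) u).length
              (by simp only [List.length_append, List.length_cons]; omega)
            rw [getElem_append_cons_self, eraseIdx_append_cons_self] at h
            exact h
          dsimp only
          rw [hpop]
          dsimp only
          rw [hmid, PySem.List.slice_to_natCast, PySem.List.slice_from_natCast]
          have hg1 : m.2.2.take midN ≠ [] := by
            intro hcon
            have := congrArg List.length hcon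
            simp only [List.length_take, List.length_nil] at this
            omega
          have hg2 : m.2.2.drop midN ≠ [] := by
            intro hcon
            have := congrArg List.length hcon
            simp only [List.length_drop, List.length_nil] at this
            omega
          rw [if_neg (by tauto)]
          have hins1 : PySem.List.insert
              (List.map (fun e => e.2.2) u ++ List.map (fun e => e.2.2) v)
              ((List.map (fun e : Int × List Int × List Int => e.2.2) u).length : Int)
              (m.2.2.drop midN) =
              List.map (fun e => e.2.2) u ++ m.2.2.drop midN ::
                List.map (fun e => e.2.2) v := by
            rw [PySem.List.insert_natCast _ _ _ (by simp)]
            rw [List.take_left' rfl, List.drop_left' rfl]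
          have hins2 : PySem.List.insert
              (List.map (fun e => e.2.2) u ++ m.2.2.drop midN ::
                List.map (fun e => e.2.2) v)
              ((List.map (fun e : Int × List Int × List Int => e.2.2) u).length : Int)
              (m.2.2.take midN) =
              List.map (fun e => e.2.2) u ++ m.2.2.take midN :: m.2.2.drop midN ::
                List.map (fun e => e.2.2) v := by
            rw [PySem.List.insert_natCast _ _ _
              (by simp only [List.length_append, List.length_cons, List.length_map]; omega)]
            rw [List.take_left' rfl, List.drop_left' rfl]
          rw [hins1, hins2]
          rw [if_pos (show m.1 ≤ -2 by rw [hinvm.1]; omega)]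
          -- apply the induction hypothesis to the refined pool
          have hperm' : (r ++ [((-(midN : Int)), m.2.1 ++ [0], m.2.2.take midN),
              ((midN : Int) - (m.2.2.length : Int), m.2.1 ++ [1], m.2.2.drop midN)]).Perm
              (u ++ ((-(midN : Int)), m.2.1 ++ [0], m.2.2.take midN) ::
               ((midN : Int) - (m.2.2.length : Int), m.2.1 ++ [1], m.2.2.drop midN) :: v) := by
            have h1 : r.Perm (u ++ v) := by
              have h2 : (m :: r).Perm (m :: (u ++ v)) :=
                hpp.symm.trans (hperm.trans List.perm_middle)
              exact h2.cons_inv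
            refine (h1.append_right _).trans ?_
            rw [List.append_assoc]
            exact List.Perm.append_left u List.perm_append_comm
          have hs' : (u ++ ((-(midN : Int)), m.2.1 ++ [0], m.2.2.take midN) ::
              ((midN : Int) - (m.2.2.length : Int), m.2.1 ++ [1], m.2.2.drop midN) :: v).Pairwise
              (fun x y => posLtS x.2.1 y.2.1 = true) := by
            rw [List.pairwise_append]
            refine ⟨hpw_u, ?_, ?_⟩
            · refine List.pairwise_cons.mpr ⟨?_, List.pairwise_cons.mpr ⟨?_, hpw_v⟩⟩
              · intro y hy
                rcases List.mem_cons.mp hy with h4 | h4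
                · rw [h4]
                  exact posLtS_snoc m.2.1 (by norm_num)
                · exact posLtS_extend_left [0] (hm_v y h4)
              · intro y hy
                exact posLtS_extend_left [1] (hm_v y hy)
            · intro a ha b hb
              have hbase := hcross a ha m (by simp)
              rcases List.mem_cons.mp hb with h4 | h4
              · rw [h4]; exact posLtS_extend_right [0] hbase
              · rcases List.mem_cons.mp h4 with h5 | h5
                · rw [h5]; exact posLtS_extend_right [1] hbase
                · exact hcross a ha b (by simp [h5])
          have hinv' : ∀ x ∈ (u ++ ((-(midN : Int)), m.2.1 ++ [0], m.2.2.take midN) ::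
              ((midN : Int) - (m.2.2.length : Int), m.2.1 ++ [1], m.2.2.drop midN) :: v),
              x.1 = -(x.2.2.length : Int) ∧ x.2.2 ≠ [] := by
            intro x hx
            rcases List.mem_append.mp hx with h4 | h4
            · exact hinv x (List.mem_append_left _ h4)
            · rcases List.mem_cons.mp h4 with h5 | h5
              · rw [h5]
                refine ⟨?_, hg1⟩
                dsimp only
                simp only [List.length_take]
                omega
              · rcases List.mem_cons.mp h5 with h7 | h7
                · rw [h7]
                  refine ⟨?_, hg2⟩
                  dsimp only
                  simp only [List.length_drop]
                  omega
                · exact hinv x (List.mem_append_right _ (List.mem_cons_of_mem _ h7))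
          have hcount' : count + 1 =
              (((r ++ [((-(midN : Int)), m.2.1 ++ [0], m.2.2.take midN),
                ((midN : Int) - (m.2.2.length : Int), m.2.1 ++ [1], m.2.2.drop midN)]).length :
                Nat) : Int) := by
            have h8 := hpp.length_eq
            simp only [List.length_append, List.length_cons, List.length_nil] at h8 ⊢
            omega
          have hrec := ih target pmf (count + 1) _ _ hperm' hs' hinv' hcount'
          simp only [List.map_append, List.map_cons] at hrec
          exact hrec
        · -- the longest clip has a single frame: B stops; A (if it selects at all)
          -- splits off an empty right half, restores the clip and breaks
          have hL1 : m.2.2.length = 1 := by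
            have h9 : m.2.2 ≠ [] := hinvm.2
            have h10 : 0 < m.2.2.length := List.length_pos_of_ne_nil h9
            omega
          have hunil : u = [] := by
            cases u with
            | nil => rfl
            | cons a as =>
              exfalso
              have h4 := hu' a.2.2 (by simp)
              have h5 := (hinv a (by simp)).2
              have h11 : 0 < a.2.2.length := List.length_pos_of_ne_nil h5
              omega
          subst hunil
          rw [if_neg (show ¬ (m.1 ≤ -2) by rw [hinvm.1]; omega)]
          rw [sortByPos_eq_of_perm hperm hs]
          simp only [List.map_nil, List.nil_append, List.map_cons, List.length_nil,
            Nat.cast_zero]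
          by_cases hpmf : pmf ≤ (m.2.2.length : Int)
          · rw [if_pos (Or.inl hpmf)]
            dsimp only
            rw [PySem.List.pop?_zero_cons]
            dsimp only
            rw [hL1]
            rw [show (((1 : Nat) : Int) + 1) / 2 = ((1 : Nat) : Int) by norm_num]
            rw [PySem.List.slice_to_natCast, PySem.List.slice_from_natCast]
            rw [List.take_of_length_le (by omega), List.drop_eq_nil_of_le (by omega)]
            rw [if_pos (Or.inr rfl)]
            rw [PySem.List.insert_zero]
          · rw [if_neg (by omega)]
    · -- count ≥ target: both loops stop
      have h6 := hperm.length_eq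
      have hBstop : refineLoopB (fuel + 1) target count heap = heap := by
        cases heap with
        | nil => rw [refineLoopB, if_neg hlt]
        | cons e rest => rw [refineLoopB, if_neg hlt]
      rw [refineLoopA, hBstop]
      rw [if_neg (by simp only [List.length_map]; omega)]
      rw [sortByPos_eq_of_perm hperm hs]

-- ---- gluing the entry points together ----

def initHeap (clips : List (List Int)) : List (Int × List Int × List Int) :=
  ((PySem.List.enumerate clips).filter (fun p => !p.2.isEmpty)).map
    (fun p => (-(p.2.length : Int), [p.1], p.2))

theorem refine_clips_alt_eq (clips : List (List Int)) (target pmf : Int) :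
    refine_clips_alt clips target pmf =
      PySem.List.slice
        ((sortByPos (refineLoopB (target - (initHeap clips).length).toNat target
          ((initHeap clips).length : Int) (initHeap clips))).map (fun e => e.2.2))
        none (some target) := rfl

theorem enum_filter_map_snd (xs : List (List Int)) (s : Int) (Q : List Int → Bool) :
    ((PySem.List.enumerate xs s).filter (fun p => Q p.2)).map (fun p => p.2) = xs.filter Q := by
  induction xs generalizing s with
  | nil => simp [PySem.List.enumerate_nil]
  | cons x xs ih =>
    rw [PySem.List.enumerate_cons, List.filter_cons]
    by_cases h : Q x = true
    · simp only [h, if_pos]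
      rw [List.map_cons, ih, List.filter_cons]
      simp [h]
    · have h' : Q x = false := by simpa using h
      simp only [h', Bool.false_eq_true, if_false]
      rw [ih, List.filter_cons]
      simp [h']

theorem initHeap_map_snd (clips : List (List Int)) :
    (initHeap clips).map (fun e => e.2.2) = clips.filter (fun c => !c.isEmpty) := by
  rw [initHeap, List.map_map]
  exact enum_filter_map_snd clips 0 (fun c => !c.isEmpty)

theorem initHeap_pairwise (clips : List (List Int)) :
    (initHeap clips).Pairwise (fun x y => posLtS x.2.1 y.2.1 = true) := by
  rw [initHeap]
  apply List.pairwise_map.mpr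
  apply List.Pairwise.imp ?_ ((PySem.List.pairwise_lt_enumerate clips 0).filter _)
  intro p q hpq
  simp only [posLtS, Bool.or_eq_true, decide_eq_true_eq]
  exact Or.inl hpq

theorem initHeap_inv (clips : List (List Int)) :
    ∀ e ∈ initHeap clips, e.1 = -(e.2.2.length : Int) ∧ e.2.2 ≠ [] := by
  intro e he
  rw [initHeap] at he
  rcases List.mem_map.mp he with ⟨p, hp, rfl⟩
  refine ⟨rfl, ?_⟩
  have h2 := (List.mem_filter.mp hp).2
  simpa using h2

-- ===== VERDICT (by name: the statement is the Claim_ definition above) =====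
theorem refine_clips_spec : Claim_equal_refine_clips := by
  intro clips target pmf _hdom
  show refine_clips clips target pmf = refine_clips_alt clips target pmf
  have hmain := mainLoop (target - (initHeap clips).length).toNat target pmf
    ((initHeap clips).length : Int) (initHeap clips) (initHeap clips)
    (List.Perm.refl _) (initHeap_pairwise clips) (initHeap_inv clips) rfl
  rw [initHeap_map_snd] at hmain
  show PySem.List.slice
      (refineLoopA (target - (clips.filter (fun c => !c.isEmpty)).length).toNat target pmf
        (clips.filter (fun c => !c.isEmpty))) none (some target) =
    refine_clips_alt clips target pmf
  rw [refine_clips_alt_eq]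
  have hlen0 : (clips.filter (fun c => !c.isEmpty)).length = (initHeap clips).length := by
    rw [← initHeap_map_snd, List.length_map]
  rw [hlen0, hmain]
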